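-- pv_equiv track=rewrite | github.com/deepomicslab/SpecImmune | evaluation/1KG_ONT/trio/analyze_trio.py | split_alleles
-- ===== SOURCE A (Python) =====
-- def split_alleles(alleles):
--     gene_result = {}
--     for genotypes in alleles:
--         geno_list = genotypes.split(";")
--         gene = geno_list[0].split("*")[0]
--         if gene not in gene_result:
--             gene_result[gene] = []
--         gene_result[gene].append(geno_list)
--     return gene_result
-- ===== SOURCE B (Python) =====
-- def split_alleles(alleles):
--     # pair each genotype string with its gene key, once
--     pairs = [(gl[0].split("*")[0], gl)
--              for gl in (genotypes.split(";") for genotypes in alleles)]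
--     genes = list(dict.fromkeys(g for g, _ in pairs))
--     return {g: [gl for gg, gl in pairs if gg == g] for g in genes}
-- ===== Notes on version B (the rewrite author's own statement) =====
-- stated objective: alternative
-- what changed: Replaces the on-the-fly dict bucketing (membership test + per-element append) with a declarative pipeline: build (gene, geno_list) pairs once, dedup the gene keys in first-occurrence order, then construct the dict by one filtering comprehension per gene.
import Mathlib
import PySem

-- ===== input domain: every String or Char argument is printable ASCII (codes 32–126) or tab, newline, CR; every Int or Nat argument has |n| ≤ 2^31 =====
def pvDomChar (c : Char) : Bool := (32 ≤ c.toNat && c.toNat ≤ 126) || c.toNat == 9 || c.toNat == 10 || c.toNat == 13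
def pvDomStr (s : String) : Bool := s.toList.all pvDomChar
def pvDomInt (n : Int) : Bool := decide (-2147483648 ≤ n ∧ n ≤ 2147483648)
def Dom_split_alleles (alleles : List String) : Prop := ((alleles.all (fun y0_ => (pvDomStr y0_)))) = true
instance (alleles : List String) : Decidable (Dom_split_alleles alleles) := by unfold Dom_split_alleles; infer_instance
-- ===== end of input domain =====

-- B replaces A's on-the-fly dict bucketing by a pairs/dedup/per-gene-filter pipeline (alternative decomposition, same results).

-- ===== PORT A =====
def split_alleles (alleles : List String) : List (String × List (List String)) :=
  (alleles.foldl (fun gene_result genotypes =>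
      let geno_list := (PySem.Str.split? genotypes ";").getD []   -- sep ≠ "", never none
      let gene := PySem.List.pyGetD ((PySem.Str.split? (PySem.List.pyGetD geno_list 0 "") "*").getD []) 0 ""
      let gene_result :=
        if gene_result.contains gene then gene_result
        else gene_result.insert gene ([] : List (List String))
      gene_result.modify gene [] (fun l => l ++ [geno_list]))
    PySem.Dict.empty).items

-- ===== PORT B =====
def split_alleles_alt (alleles : List String) : List (String × List (List String)) :=
  let pairs := alleles.map (fun genotypes =>
      let geno_list := (PySem.Str.split? genotypes ";").getD []   -- sep ≠ "", never none
      (PySem.List.pyGetD ((PySem.Str.split? (PySem.List.pyGetD geno_list 0 "") "*").getD []) 0 "", geno_list))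
  let genes := PySem.List.dedup (pairs.map (·.1))
  genes.map (fun g => (g, (pairs.filter (fun p => p.1 == g)).map (·.2)))

-- ===== PRECONDITION & SPEC =====
def Spec_split_alleles (alleles : List String) (out : List (String × List (List String))) : Prop := out = split_alleles_alt alleles
instance (alleles : List String) (out : List (String × List (List String))) : Decidable (Spec_split_alleles alleles out) := by unfold Spec_split_alleles; infer_instance

-- ===== CLAIM (what is proved, stated in full; the proofs are below) =====
def Claim_equal_split_alleles : Prop := ∀ (alleles : List String), Dom_split_alleles alleles → Spec_split_alleles alleles (split_alleles alleles)

-- ===== LEMMAS AND PROOFS =====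

-- A's loop body equals a plain modify-with-default (the conditional pre-insert of [] is absorbed by modify)
theorem pv_step_eq (d : PySem.Dict String (List (List String))) (k : String) (v : List (List String) → List (List String)) :
    (if d.contains k then d else d.insert k ([] : List (List String))).modify k [] v
      = d.modify k [] v := by
  by_cases h : d.contains k = true
  · simp [h]
  · rw [Bool.not_eq_true] at h
    simp [PySem.Dict.modify, h, PySem.Dict.getD_insert_self, PySem.Dict.insert_insert_self,
      PySem.Dict.getD_of_not_contains]

-- the items of a modify-append grouping fold over (key, value) pairs, as B computes them
theorem pv_grouping (pairs : List (String × List String)) :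
    (pairs.foldl (fun d p => d.modify p.1 [] (fun l => l ++ [p.2])) PySem.Dict.empty).items
      = (PySem.List.dedup (pairs.map (·.1))).map
          (fun g => (g, (pairs.filter (fun p => p.1 == g)).map (·.2))) := by
  have hnd : (pairs.foldl (fun d p => d.modify p.1 [] (fun l => l ++ [p.2])) PySem.Dict.empty).keys.Nodup :=
    PySem.Dict.nodup_keys_foldl_modify_key pairs Prod.fst [] (fun _ p => (fun l => l ++ [p.2]))
      PySem.Dict.empty PySem.Dict.nodup_keys_empty
  rw [PySem.Dict.items_eq_map_keys _ hnd ([] : List (List String)),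
    PySem.Dict.keys_foldl_modify_key pairs Prod.fst [] (fun _ p => (fun l => l ++ [p.2])) PySem.Dict.empty]
  have hkeys : PySem.Set.update (PySem.Dict.keys (PySem.Dict.empty (κ := String) (ν := List (List String))))
      (pairs.map Prod.fst) = PySem.List.dedup (pairs.map (·.1)) := by
    simp [PySem.Dict.keys_empty, PySem.Set.update_nil_left, PySem.List.dedup_eq_ofList]
  rw [hkeys]
  refine List.map_congr_left ?_
  intro g _
  simp [PySem.Dict.getD_foldl_modify_append]

theorem split_alleles_eq_alt (alleles : List String) :
    split_alleles alleles = split_alleles_alt alleles := by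
  unfold split_alleles split_alleles_alt
  have hf : (fun (gene_result : PySem.Dict String (List (List String))) (genotypes : String) =>
      let geno_list := (PySem.Str.split? genotypes ";").getD []
      let gene := PySem.List.pyGetD ((PySem.Str.split? (PySem.List.pyGetD geno_list 0 "") "*").getD []) 0 ""
      let gene_result :=
        if gene_result.contains gene then gene_result
        else gene_result.insert gene ([] : List (List String))
      gene_result.modify gene [] (fun l => l ++ [geno_list]))
    = (fun d genotypes =>
      let geno_list := (PySem.Str.split? genotypes ";").getD []
      let gene := PySem.List.pyGetD ((PySem.Str.split? (PySem.List.pyGetD geno_list 0 "") "*").getD []) 0 ""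
      d.modify gene [] (fun l => l ++ [geno_list])) := by
    funext d g
    exact pv_step_eq d _ _
  rw [hf]
  have hmap : (alleles.foldl (fun d genotypes =>
      let geno_list := (PySem.Str.split? genotypes ";").getD []
      let gene := PySem.List.pyGetD ((PySem.Str.split? (PySem.List.pyGetD geno_list 0 "") "*").getD []) 0 ""
      d.modify gene [] (fun l => l ++ [geno_list])) PySem.Dict.empty)
    = ((alleles.map (fun genotypes =>
        let geno_list := (PySem.Str.split? genotypes ";").getD []
        (PySem.List.pyGetD ((PySem.Str.split? (PySem.List.pyGetD geno_list 0 "") "*").getD []) 0 "", geno_list))).foldl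
        (fun d p => d.modify p.1 [] (fun l => l ++ [p.2])) PySem.Dict.empty) := by
    rw [List.foldl_map]
  rw [hmap]
  exact pv_grouping _

-- ===== VERDICT (by name: the statement is the Claim_ definition above) =====
theorem split_alleles_spec : Claim_equal_split_alleles := by
  intro alleles _
  exact split_alleles_eq_alt alleles
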